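-- pv_equiv track=rewrite | github.com/NWood-Git/other_challenge_questions | merge_index.py | merge_index2
-- ===== SOURCE A (Python) =====
-- def merge_index2(l1,l2):
--     idx = len(l1) -1
--     while idx > 0:
--         if l1[idx] != l2[idx]:
--             result = idx +1
--             return -1 if result == len(l1) else result
--         idx -= 1
--     return 0
-- ===== SOURCE B (Python) =====
-- def merge_index2(l1, l2):
--     diffs = [i for i in range(1, len(l1)) if l1[i] != l2[i]]
--     if not diffs:
--         return 0
--     idx = diffs[-1]
--     return -1 if idx + 1 == len(l1) else idx + 1
-- ===== Notes on version B (the rewrite author's own statement) =====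
-- stated objective: alternative
-- what changed: A scans backward from the end with early exit at the first differing index; B forward-builds the full list of differing indices in range(1, len(l1)) with a comprehension, returns 0 if it is empty and otherwise reduces it to its last (maximal) element before applying the same -1/idx+1 post-rule.
import Mathlib
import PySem

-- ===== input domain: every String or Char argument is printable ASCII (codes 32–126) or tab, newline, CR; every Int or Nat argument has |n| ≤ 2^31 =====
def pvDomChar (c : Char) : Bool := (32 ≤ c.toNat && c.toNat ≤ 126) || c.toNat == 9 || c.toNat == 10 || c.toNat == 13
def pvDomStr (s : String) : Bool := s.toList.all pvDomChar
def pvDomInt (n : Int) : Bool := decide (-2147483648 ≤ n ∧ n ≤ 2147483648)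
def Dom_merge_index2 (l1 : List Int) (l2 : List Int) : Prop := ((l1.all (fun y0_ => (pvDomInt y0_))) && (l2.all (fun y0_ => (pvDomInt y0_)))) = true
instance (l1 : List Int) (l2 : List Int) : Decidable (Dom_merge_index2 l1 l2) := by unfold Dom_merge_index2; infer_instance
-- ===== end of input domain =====

-- B rebuilds the answer forward: it collects ALL differing indices in range(1, len(l1)) in one
-- comprehension, then reduces that list (empty → 0, else its last element) — instead of A's
-- backward early-exit scan. Return values agree on all of Pre_ (where neither Python raises).

-- ===== PORT A =====
-- the while-loop of A: argument is the current idx (a Nat, since the loop runs while idx > 0);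
-- pyGetD is exact here because Pre_ keeps every visited index in range of both lists
def merge_index2_loop (l1 : List Int) (l2 : List Int) : Nat → Int
  | 0 => 0
  | k + 1 =>
    let idx : Int := (k : Int) + 1
    if PySem.List.pyGetD l1 idx 0 ≠ PySem.List.pyGetD l2 idx 0 then
      if idx + 1 = (l1.length : Int) then -1 else idx + 1
    else
      merge_index2_loop l1 l2 k

def merge_index2 (l1 : List Int) (l2 : List Int) : Int :=
  merge_index2_loop l1 l2 (l1.length - 1)

-- ===== PORT B =====
-- the tail of B after the comprehension: "if not diffs: return 0 … diffs[-1] …"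
def merge_index2_finish (l1 : List Int) (diffs : List Int) : Int :=
  if diffs.isEmpty then 0
  else
    let idx := PySem.List.pyGetD diffs (-1) 0   -- diffs[-1]; exact: this branch has diffs ≠ []
    if idx + 1 = (l1.length : Int) then -1 else idx + 1

def merge_index2_alt (l1 : List Int) (l2 : List Int) : Int :=
  merge_index2_finish l1 ((PySem.List.pyRange 1 (l1.length : Int) 1).filter
      (fun i => PySem.List.pyGetD l1 i 0 != PySem.List.pyGetD l2 i 0))

-- ===== PRECONDITION & SPEC =====
-- Pre_ excludes exactly the inputs where Python A raises IndexError (l2 shorter than l1 with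
-- len(l1) ≥ 2: the very first access l2[len(l1)-1] is out of range); Python B raises there too.
def Pre_merge_index2 (l1 : List Int) (l2 : List Int) : Prop :=
  l1.length ≤ l2.length ∨ l1.length ≤ 1
instance (l1 : List Int) (l2 : List Int) : Decidable (Pre_merge_index2 l1 l2) := by
  unfold Pre_merge_index2; infer_instance

def pvWitness_merge_index2 : List Int × List Int := ([1, 2, 3], [1, 5, 3])

def Spec_merge_index2 (l1 : List Int) (l2 : List Int) (out : Int) : Prop := out = merge_index2_alt l1 l2
instance (l1 : List Int) (l2 : List Int) (out : Int) : Decidable (Spec_merge_index2 l1 l2 out) := by unfold Spec_merge_index2; infer_instance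

-- ===== CLAIM (what is proved, stated in full; the proofs are below) =====
def Claim_equal_merge_index2 : Prop := ∀ (l1 : List Int) (l2 : List Int), Dom_merge_index2 l1 l2 → Pre_merge_index2 l1 l2 → Spec_merge_index2 l1 l2 (merge_index2 l1 l2)

-- ===== LEMMAS AND PROOFS =====

lemma merge_index2_finish_append (l1 fs : List Int) (x : Int) :
    merge_index2_finish l1 (fs ++ [x]) =
      if x + 1 = (l1.length : Int) then -1 else x + 1 := by
  simp [merge_index2_finish, PySem.List.pyGetD_neg_one_append_singleton]

-- the backward early-exit scan down from index k equals the reduction of the forward-collected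
-- list of differing indices among 1..k
lemma merge_index2_loop_eq (l1 l2 : List Int) (k : Nat) :
    merge_index2_loop l1 l2 k =
      merge_index2_finish l1 ((PySem.List.pyRange 1 ((k : Int) + 1) 1).filter
        (fun i => PySem.List.pyGetD l1 i 0 != PySem.List.pyGetD l2 i 0)) := by
  induction k with
  | zero =>
    rw [PySem.List.pyRange_one_eq_nil (by norm_num)]
    simp [merge_index2_loop, merge_index2_finish]
  | succ k ih =>
    have hcast : (((k + 1 : Nat) : Int) + 1) = ((k : Int) + 1) + 1 := by push_cast; ring
    rw [hcast, PySem.List.pyRange_one_succ_right (by omega), List.filter_append,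
      List.filter_singleton]
    by_cases h : PySem.List.pyGetD l1 ((k : Int) + 1) 0 = PySem.List.pyGetD l2 ((k : Int) + 1) 0
    · have hb : (PySem.List.pyGetD l1 ((k : Int) + 1) 0 != PySem.List.pyGetD l2 ((k : Int) + 1) 0)
          = false := by simpa using h
      rw [hb, cond_false, List.append_nil, ← ih]
      simp [merge_index2_loop, h]
    · have hb : (PySem.List.pyGetD l1 ((k : Int) + 1) 0 != PySem.List.pyGetD l2 ((k : Int) + 1) 0)
          = true := by simpa using h
      simp only [merge_index2_loop, hb, cond_true]
      rw [if_pos h, merge_index2_finish_append]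

theorem merge_index2_eq_alt (l1 l2 : List Int) : merge_index2 l1 l2 = merge_index2_alt l1 l2 := by
  unfold merge_index2 merge_index2_alt
  rcases Nat.eq_zero_or_pos l1.length with hl | hl
  · rw [hl]
    have hr : PySem.List.pyRange 1 ((0 : Nat) : Int) 1 = [] :=
      PySem.List.pyRange_one_eq_nil (by norm_num)
    rw [hr]
    simp [merge_index2_loop, merge_index2_finish]
  · rw [merge_index2_loop_eq]
    have h2 : ((l1.length - 1 : Nat) : Int) + 1 = (l1.length : Int) := by omega
    rw [h2]

-- ===== VERDICT (by name: the statement is the Claim_ definition above) =====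
theorem merge_index2_spec : Claim_equal_merge_index2 := by
  intro l1 l2 _ _
  unfold Spec_merge_index2
  exact merge_index2_eq_alt l1 l2
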